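-- pv_equiv track=rewrite | github.com/JuRehl/Teoria-De-algoritmos-buchwald-FIUBA | Primer parcial/ejercicios_parciales.py | unir_congeladores
-- ===== SOURCE A (Python) =====
-- def unir_congeladores(congeladores):
--     perdida=0
--     perdidas = [sum(congelador) for congelador in congeladores]
--
--     while len(perdidas)>1:
--         min1=min(perdidas)
--         perdidas.remove(min1)
--         min2=min(perdidas)
--         perdidas.remove(min2)
--
--         total=min1+min2
--         perdida+=total
--         perdidas.append(total)
--
--     return perdidas
-- ===== SOURCE B (Python) =====
-- def unir_congeladores(congeladores):
--     # The merge loop always ends with the grand total (list sum is merge-invariant),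
--     # so just sum everything; [] when there are no freezers.
--     if not congeladores:
--         return []
--     return [sum(map(sum, congeladores))]
-- ===== Notes on version B (the rewrite author's own statement) =====
-- stated objective: simpler
-- what changed: Replaces the repeated min-remove-merge loop with a single closed-form total sum, since each merge preserves the list sum and the loop ends with one element.
import Mathlib
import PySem

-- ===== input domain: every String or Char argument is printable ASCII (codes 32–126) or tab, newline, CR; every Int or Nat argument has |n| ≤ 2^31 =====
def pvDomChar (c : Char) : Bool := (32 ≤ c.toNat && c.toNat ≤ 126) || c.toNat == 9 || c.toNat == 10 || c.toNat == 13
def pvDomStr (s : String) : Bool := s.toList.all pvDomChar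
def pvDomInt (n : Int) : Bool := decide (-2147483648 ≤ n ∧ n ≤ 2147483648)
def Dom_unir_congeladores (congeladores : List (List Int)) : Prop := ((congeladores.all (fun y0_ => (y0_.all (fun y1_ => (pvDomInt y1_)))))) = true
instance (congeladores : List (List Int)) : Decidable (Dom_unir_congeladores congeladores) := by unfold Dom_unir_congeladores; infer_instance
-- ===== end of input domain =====

-- B replaces A's min-remove-merge loop by the closed-form grand total (each merge preserves the list sum); objective: simpler.

-- ===== PORT A =====
-- the while loop of A; the .getD defaults are unreachable totality guards
-- (when 1 < l.length, min? and remove? always return some).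
def pvLoopA (l : List Int) : List Int :=
  if h : 1 < l.length then
    let m1 := (PySem.List.min? l (fun x => x)).getD 0
    let l1 := (PySem.List.remove? l m1).getD []
    let m2 := (PySem.List.min? l1 (fun x => x)).getD 0
    let l2 := (PySem.List.remove? l1 m2).getD []
    pvLoopA (l2 ++ [m1 + m2])
  else l
termination_by l.length
decreasing_by
  have hl : l ≠ [] := by intro e; simp [e] at h
  obtain ⟨a1, ha1⟩ := Option.ne_none_iff_exists'.mp
    (fun e => hl ((PySem.List.min?_eq_none_iff l (fun x => x)).mp e))
  have hm1 : a1 ∈ l := PySem.List.min?_mem ha1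
  have hr1 : PySem.List.remove? l a1 = some (l.erase a1) := PySem.List.remove?_eq_some_erase l a1 hm1
  have hlen1 : (l.erase a1).length = l.length - 1 := List.length_erase_of_mem hm1
  have hne1 : l.erase a1 ≠ [] := by
    intro e; rw [e] at hlen1; simp at hlen1; omega
  obtain ⟨a2, ha2⟩ := Option.ne_none_iff_exists'.mp
    (fun e => hne1 ((PySem.List.min?_eq_none_iff (l.erase a1) (fun x => x)).mp e))
  have hm2 : a2 ∈ l.erase a1 := PySem.List.min?_mem ha2
  have hr2 : PySem.List.remove? (l.erase a1) a2 = some ((l.erase a1).erase a2) :=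
    PySem.List.remove?_eq_some_erase (l.erase a1) a2 hm2
  have hlen2 : ((l.erase a1).erase a2).length = (l.erase a1).length - 1 :=
    List.length_erase_of_mem hm2
  simp [ha1, hr1, ha2, hr2, hlen2, hlen1]
  omega

def unir_congeladores (congeladores : List (List Int)) : List Int :=
  -- perdida accumulates but is unused for the return value; the comprehension then the while loop
  pvLoopA (congeladores.map (fun congelador => congelador.sum))

-- ===== PORT B =====
def unir_congeladores_alt (congeladores : List (List Int)) : List Int :=
  if congeladores.isEmpty then []
  else [(congeladores.map (fun x => x.sum)).sum]

-- ===== PRECONDITION & SPEC =====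
def Spec_unir_congeladores (congeladores : List (List Int)) (out : List Int) : Prop := out = unir_congeladores_alt congeladores
instance (congeladores : List (List Int)) (out : List Int) : Decidable (Spec_unir_congeladores congeladores out) := by unfold Spec_unir_congeladores; infer_instance

-- ===== CLAIM (what is proved, stated in full; the proofs are below) =====
def Claim_equal_unir_congeladores : Prop := ∀ (congeladores : List (List Int)), Dom_unir_congeladores congeladores → Spec_unir_congeladores congeladores (unir_congeladores congeladores)

-- ===== LEMMAS AND PROOFS =====

-- each iteration of A's loop preserves the list sum and shortens the list; hence the loop
-- ends with the singleton grand total whenever it starts nonempty.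
theorem pvLoopA_eq_sum (l : List Int) (hl : l ≠ []) : pvLoopA l = [l.sum] := by
  induction l using (measure List.length).wf.induction with
  | _ l ih =>
  by_cases h : 1 < l.length
  · obtain ⟨a1, ha1⟩ := Option.ne_none_iff_exists'.mp
      (fun e => hl ((PySem.List.min?_eq_none_iff l (fun x => x)).mp e))
    have hm1 : a1 ∈ l := PySem.List.min?_mem ha1
    have hr1 : PySem.List.remove? l a1 = some (l.erase a1) := PySem.List.remove?_eq_some_erase l a1 hm1
    have hlen1 : (l.erase a1).length = l.length - 1 := List.length_erase_of_mem hm1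
    have hne1 : l.erase a1 ≠ [] := by
      intro e; rw [e] at hlen1; simp at hlen1; omega
    obtain ⟨a2, ha2⟩ := Option.ne_none_iff_exists'.mp
      (fun e => hne1 ((PySem.List.min?_eq_none_iff (l.erase a1) (fun x => x)).mp e))
    have hm2 : a2 ∈ l.erase a1 := PySem.List.min?_mem ha2
    have hr2 : PySem.List.remove? (l.erase a1) a2 = some ((l.erase a1).erase a2) :=
      PySem.List.remove?_eq_some_erase (l.erase a1) a2 hm2
    have hlen2 : ((l.erase a1).erase a2).length = (l.erase a1).length - 1 :=
      List.length_erase_of_mem hm2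
    have hsum1 : a1 + (l.erase a1).sum = l.sum := by
      have := (List.perm_cons_erase hm1).sum_eq; simpa using this.symm
    have hsum2 : a2 + ((l.erase a1).erase a2).sum = (l.erase a1).sum := by
      have := (List.perm_cons_erase hm2).sum_eq; simpa using this.symm
    rw [pvLoopA.eq_def]
    simp only [h, dite_true, ha1, hr1, ha2, hr2, Option.getD_some]
    have hdec : ((l.erase a1).erase a2 ++ [a1 + a2]).length < l.length := by
      simp [hlen2, hlen1]; omega
    rw [ih _ hdec (by simp)]
    have hs : ((l.erase a1).erase a2 ++ [a1 + a2]).sum = l.sum := by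
      simp only [List.sum_append, List.sum_cons, List.sum_nil]
      omega
    rw [hs]
  · rw [pvLoopA.eq_def]
    simp only [h, dite_false]
    match l, hl with
    | [x], _ => simp
    | x :: y :: t, _ => exfalso; simp at h

-- ===== VERDICT (by name: the statement is the Claim_ definition above) =====
theorem unir_congeladores_spec : Claim_equal_unir_congeladores := by
  intro c _
  unfold Spec_unir_congeladores unir_congeladores unir_congeladores_alt
  cases c with
  | nil => rw [pvLoopA.eq_def]; simp
  | cons h t =>
    rw [pvLoopA_eq_sum _ (by simp)]
    simp
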